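-- pv_equiv track=rewrite | github.com/davidgasquez/fil-retro-pgf-3-ai-badgeholder | rank.py | build_win_matrix
-- ===== SOURCE A (Python) =====
-- from collections import defaultdict
--
-- def build_win_matrix(
--     results: list[tuple[str, str, str]],
-- ) -> tuple[dict[str, dict[str, int]], dict[str, tuple[int, int]]]:
--     """Create a wins matrix and per-project (wins, total) counts."""
--     wins: dict[str, dict[str, int]] = defaultdict(lambda: defaultdict(int))
--     records: dict[str, tuple[int, int]] = defaultdict(lambda: (0, 0))
--
--     for a, b, winner in results:
--         if winner == a:
--             wins[a][b] += 1
--             w, t = records[a]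
--             records[a] = (w + 1, t + 1)
--             w, t = records[b]
--             records[b] = (w, t + 1)
--         else:
--             wins[b][a] += 1
--             w, t = records[b]
--             records[b] = (w + 1, t + 1)
--             w, t = records[a]
--             records[a] = (w, t + 1)
--
--         # ensure all participants exist in the mapping
--         wins[a]
--         wins[b]
--         records[a]
--         records[b]
--     return wins, records
-- ===== SOURCE B (Python) =====
-- from collections import defaultdict
--
-- def build_win_matrix(
--     results: list[tuple[str, str, str]],
-- ) -> tuple[dict[str, dict[str, int]], dict[str, tuple[int, int]]]:
--     """Create a wins matrix and per-project (wins, total) counts."""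
--     wins: dict[str, dict[str, int]] = defaultdict(lambda: defaultdict(int))
--     appearances: dict[str, int] = defaultdict(int)
--     order: dict[str, None] = {}
--
--     # single pass: win counts and appearance counts only
--     for a, b, winner in results:
--         win, lose = (a, b) if winner == a else (b, a)
--         wins[win][lose] += 1
--         wins[lose]  # materialize the loser too
--         appearances[a] += 1
--         appearances[b] += 1
--         order[win] = None
--         order[lose] = None
--
--     # derive records afterwards
--     records: dict[str, tuple[int, int]] = defaultdict(lambda: (0, 0))
--     for x in order:
--         records[x] = (sum(wins[x].values()), appearances[x])
--     return wins, records
-- ===== Notes on version B (the rewrite author's own statement) =====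
-- stated objective: alternative
-- what changed: A interleaves win-matrix updates with incremental (wins, total) record bookkeeping inside one loop; B's single pass maintains only the win matrix, per-slot appearance counts and participant order, and derives records afterwards as (sum of the participant's win-matrix row, appearance count).
import Mathlib
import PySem

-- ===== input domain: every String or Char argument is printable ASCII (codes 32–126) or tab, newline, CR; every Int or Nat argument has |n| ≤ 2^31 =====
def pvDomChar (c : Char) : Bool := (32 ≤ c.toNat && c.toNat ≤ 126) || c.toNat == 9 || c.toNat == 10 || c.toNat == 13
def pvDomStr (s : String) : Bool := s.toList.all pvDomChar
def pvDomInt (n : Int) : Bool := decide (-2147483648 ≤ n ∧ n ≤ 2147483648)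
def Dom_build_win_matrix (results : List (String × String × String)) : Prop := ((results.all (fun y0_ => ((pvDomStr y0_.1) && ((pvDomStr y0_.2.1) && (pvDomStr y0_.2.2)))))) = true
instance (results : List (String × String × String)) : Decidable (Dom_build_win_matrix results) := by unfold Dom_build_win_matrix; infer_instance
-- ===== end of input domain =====

-- B builds only the win matrix plus per-participant appearance counts in one pass and derives the
-- (wins, total) records afterwards from the win-matrix row sums (a different decomposition of the same task).


-- ===== PORT A =====
-- loop body of A's 'for a, b, winner in results'; state = (wins, records) as insertion-ordered dicts
-- (defaultdict access wins[k] / records[k] is modelled as insert k (getD k default): a no-op on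
--  present keys, materialization for absent ones — exactly CPython's defaultdict __getitem__)
def build_win_matrix_step
    (st : PySem.Dict String (PySem.Dict String Int) × PySem.Dict String (Int × Int))
    (r : String × String × String) :
    PySem.Dict String (PySem.Dict String Int) × PySem.Dict String (Int × Int) :=
  let a := r.1
  let b := r.2.1
  let winner := r.2.2
  let wr :=
    if winner == a then
      let wins := st.1.insert a ((st.1.getD a PySem.Dict.empty).modify b 0 (· + 1))
      let wt := st.2.getD a (0, 0)
      let records := st.2.insert a (wt.1 + 1, wt.2 + 1)
      let wt2 := records.getD b (0, 0)
      let records := records.insert b (wt2.1, wt2.2 + 1)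
      (wins, records)
    else
      let wins := st.1.insert b ((st.1.getD b PySem.Dict.empty).modify a 0 (· + 1))
      let wt := st.2.getD b (0, 0)
      let records := st.2.insert b (wt.1 + 1, wt.2 + 1)
      let wt2 := records.getD a (0, 0)
      let records := records.insert a (wt2.1, wt2.2 + 1)
      (wins, records)
  let wins := wr.1.insert a (wr.1.getD a PySem.Dict.empty)
  let wins := wins.insert b (wins.getD b PySem.Dict.empty)
  let records := wr.2.insert a (wr.2.getD a (0, 0))
  let records := records.insert b (records.getD b (0, 0))
  (wins, records)

def build_win_matrix (results : List (String × String × String)) :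
    (List (String × List (String × Int))) × (List (String × Int × Int)) :=
  let st := results.foldl build_win_matrix_step (PySem.Dict.empty, PySem.Dict.empty)
  (st.1.items.map (fun p => (p.1, p.2.items)), st.2.items)


-- ===== PORT B =====
-- B's single pass: win matrix + appearance counts + participant order; records derived afterwards
def build_win_matrix_alt_step
    (st : PySem.Dict String (PySem.Dict String Int) × PySem.Dict String Int × PySem.Set String)
    (r : String × String × String) :
    PySem.Dict String (PySem.Dict String Int) × PySem.Dict String Int × PySem.Set String :=
  let a := r.1
  let b := r.2.1
  let winner := r.2.2
  let wl := if winner == a then (a, b) else (b, a)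
  let win := wl.1
  let lose := wl.2
  let wins := st.1.insert win ((st.1.getD win PySem.Dict.empty).modify lose 0 (· + 1))
  let wins := wins.insert lose (wins.getD lose PySem.Dict.empty)
  let app := st.2.1.modify a 0 (· + 1)
  let app := app.modify b 0 (· + 1)
  let order := (st.2.2.add win).add lose
  (wins, app, order)

def build_win_matrix_alt (results : List (String × String × String)) :
    (List (String × List (String × Int))) × (List (String × Int × Int)) :=
  let st := results.foldl build_win_matrix_alt_step (PySem.Dict.empty, PySem.Dict.empty, ([] : PySem.Set String))
  let records := st.2.2.foldl
    (fun (d : PySem.Dict String (Int × Int)) x =>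
      d.insert x (((st.1.getD x PySem.Dict.empty).values).sum, st.2.1.getD x 0))
    PySem.Dict.empty
  (st.1.items.map (fun p => (p.1, p.2.items)), records.items)


-- ===== PRECONDITION & SPEC =====
def Spec_build_win_matrix (results : List (String × String × String)) (out : (List (String × List (String × Int))) × (List (String × Int × Int))) : Prop := out = build_win_matrix_alt results
instance (results : List (String × String × String)) (out : (List (String × List (String × Int))) × (List (String × Int × Int))) : Decidable (Spec_build_win_matrix results out) := by unfold Spec_build_win_matrix; infer_instance

-- ===== CLAIM (what is proved, stated in full; the proofs are below) =====
def Claim_equal_build_win_matrix : Prop := ∀ (results : List (String × String × String)), Dom_build_win_matrix results → Spec_build_win_matrix results (build_win_matrix results)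

-- ===== LEMMAS AND PROOFS =====

def mkD (o : List String) (g : String → Int × Int) : PySem.Dict String (Int × Int) :=
  ⟨o.map (fun x => (x, g x))⟩

theorem keys_mkD (o : List String) (g : String → Int × Int) : (mkD o g).keys = o := by
  simp [mkD, PySem.Dict.keys, Function.comp_def]

theorem contains_mkD (o : List String) (g : String → Int × Int) (y : String) :
    (mkD o g).contains y = decide (y ∈ o) := by
  rw [PySem.Dict.contains_eq_decide_mem_keys, keys_mkD]

theorem getD_mkD (o : List String) (g : String → Int × Int) (y : String) (d0 : Int × Int) :
    (mkD o g).getD y d0 = if y ∈ o then g y else d0 := by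
  induction o with
  | nil => simp [mkD, PySem.Dict.getD, PySem.Dict.get?]
  | cons x t ih =>
    by_cases hx : x = y
    · subst hx; simp [mkD, PySem.Dict.getD, PySem.Dict.get?]
    · have hyx : y ≠ x := fun h => hx h.symm
      simp only [mkD, PySem.Dict.getD, PySem.Dict.get?, List.map_cons, List.find?_cons] at *
      simp only [show ((x, g x).1 == y) = false by simpa using hx]
      rw [ih]
      simp [List.mem_cons, hyx]

theorem set_add_of_mem (o : PySem.Set String) (y : String) (hy : y ∈ o) :
    PySem.Set.add o y = o := by
  simp [PySem.Set.add, hy]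

theorem set_add_of_not_mem (o : PySem.Set String) (y : String) (hy : y ∉ o) :
    PySem.Set.add o y = o ++ [y] := by
  simp [PySem.Set.add, hy]

theorem insert_mkD (o : List String) (g : String → Int × Int) (y : String) (v : Int × Int) :
    (mkD o g).insert y v = mkD (PySem.Set.add o y) (fun x => if x = y then v else g x) := by
  by_cases hy : y ∈ o
  · have hc : (mkD o g).contains y = true := by rw [contains_mkD]; simpa using hy
    apply PySem.Dict.ext
    rw [PySem.Dict.items_insert_of_contains _ _ hc, set_add_of_mem o y hy]
    simp only [mkD, List.map_map]
    apply List.map_congr_left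
    intro x _
    by_cases hxy : x = y <;> simp [hxy]
  · have hc : (mkD o g).contains y = false := by rw [contains_mkD]; simpa using hy
    apply PySem.Dict.ext
    rw [PySem.Dict.items_insert_of_not_contains _ _ hc, set_add_of_not_mem o y hy]
    simp only [mkD, List.map_append, List.map_cons, List.map_nil, if_pos rfl]
    congr 1
    apply List.map_congr_left
    intro x hx
    have : x ≠ y := fun h => hy (h ▸ hx)
    simp [this]

theorem mkD_congr (o : List String) (g g' : String → Int × Int)
    (h : ∀ x ∈ o, g x = g' x) : mkD o g = mkD o g' := by
  apply PySem.Dict.ext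
  simp only [mkD]
  apply List.map_congr_left
  intro x hx
  rw [h x hx]

theorem insert_getD_self {ν : Type} (d : PySem.Dict String ν) (k : String) (d0 : ν)
    (hn : d.keys.Nodup) (hc : d.contains k = true) :
    d.insert k (d.getD k d0) = d := by
  apply PySem.Dict.ext
  rw [PySem.Dict.items_insert_of_contains _ _ hc]
  have h2 : ∀ p ∈ d.items, (if (p.1 == k) = true then (k, d.getD k d0) else p) = p := by
    rintro ⟨k', v⟩ hp
    by_cases hk : k' = k
    · subst hk
      have := PySem.Dict.getD_of_mem_items d hp hn d0
      simp [this]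
    · simp [hk]
  rw [List.map_congr_left h2]
  simp

theorem nodup_set_add (o : PySem.Set String) (y : String) (h : o.Nodup) :
    (PySem.Set.add o y).Nodup := by
  by_cases hy : y ∈ o
  · rw [set_add_of_mem o y hy]; exact h
  · rw [set_add_of_not_mem o y hy]
    rw [List.nodup_append]
    refine ⟨h, List.nodup_singleton y, ?_⟩
    intro a ha c hc
    have hc' : c = y := by simpa using hc
    subst hc'
    exact fun h' => hy (h' ▸ ha)

theorem mem_set_add (o : PySem.Set String) (y x : String) (hx : x ∈ o) :
    x ∈ PySem.Set.add o y :=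
  (PySem.Set.mem_add o y x).2 (Or.inl hx)

theorem mem_set_add_self (o : PySem.Set String) (y : String) : y ∈ PySem.Set.add o y :=
  (PySem.Set.mem_add o y y).2 (Or.inr rfl)

theorem sum_values_insert (d : PySem.Dict String Int) (k : String) (v : Int)
    (hn : d.keys.Nodup) :
    ((d.insert k v).values).sum = (d.values).sum + v - d.getD k 0 := by
  obtain ⟨l⟩ := d
  induction l with
  | nil =>
    simp [PySem.Dict.insert, PySem.Dict.contains, PySem.Dict.values, PySem.Dict.getD,
      PySem.Dict.get?]
  | cons p t ih =>
    by_cases hp : p.1 = k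
    · have hck : (p.1 == k) = true := by simp [hp]
      have hc : (PySem.Dict.mk (p :: t)).contains k = true := by
        simp [PySem.Dict.contains, hck]
      have htk : ∀ q ∈ t, (q.1 == k) = false := by
        intro q hq
        simp only [PySem.Dict.keys, List.map_cons, List.nodup_cons] at hn
        have : q.1 ≠ p.1 := fun h => hn.1 (h ▸ List.mem_map_of_mem hq)
        simpa [hp] using this
      have hv : ((PySem.Dict.mk (p :: t)).insert k v).items = (k, v) :: t := by
        rw [PySem.Dict.items_insert_of_contains _ v hc]
        simp only [List.map_cons, hck, if_pos rfl]
        congr 1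
        have h3 : ∀ q ∈ t, (if (q.1 == k) = true then (k, v) else q) = q := by
          intro q hq; simp [htk q hq]
        rw [List.map_congr_left h3]
        simp
      have hg : (PySem.Dict.mk (p :: t)).getD k 0 = p.2 := by
        simp [PySem.Dict.getD, PySem.Dict.get?, List.find?_cons, hck]
      rw [hg]
      simp only [PySem.Dict.values, hv, List.map_cons, List.sum_cons]
      ring
    · have hbk : (p.1 == k) = false := by simp [hp]
      have hnt : (PySem.Dict.mk t).keys.Nodup := by
        simp only [PySem.Dict.keys, List.map_cons, List.nodup_cons] at hn
        exact hn.2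
      have hc2 : (PySem.Dict.mk (p :: t)).contains k = (PySem.Dict.mk t).contains k := by
        simp [PySem.Dict.contains, hbk]
      have hitems : ((PySem.Dict.mk (p :: t)).insert k v).items
          = p :: ((PySem.Dict.mk t).insert k v).items := by
        by_cases hct : (PySem.Dict.mk t).contains k = true
        · rw [PySem.Dict.items_insert_of_contains _ v (by rw [hc2]; exact hct),
            PySem.Dict.items_insert_of_contains _ v hct]
          simp only [List.map_cons, hbk, Bool.false_eq_true, if_false]
        · have hct' : (PySem.Dict.mk t).contains k = false := by
            simp only [Bool.not_eq_true] at hct; exact hct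
          rw [PySem.Dict.items_insert_of_not_contains _ v (by rw [hc2]; exact hct'),
            PySem.Dict.items_insert_of_not_contains _ v hct']
          simp
      have hg : (PySem.Dict.mk (p :: t)).getD k 0 = (PySem.Dict.mk t).getD k 0 := by
        simp [PySem.Dict.getD, PySem.Dict.get?, List.find?_cons, hbk]
      rw [hg]
      simp only [PySem.Dict.values, hitems, List.map_cons, List.sum_cons]
      have := ih hnt
      simp only [PySem.Dict.values] at this
      rw [this]
      ring

def gInv (w : PySem.Dict String (PySem.Dict String Int)) (app : PySem.Dict String Int)
    (x : String) : Int × Int :=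
  (((w.getD x PySem.Dict.empty).values).sum, app.getD x 0)

def InvBW (w : PySem.Dict String (PySem.Dict String Int)) (app : PySem.Dict String Int)
    (o : PySem.Set String) : Prop :=
  o.Nodup ∧ w.keys.Nodup ∧ (∀ x, (w.getD x PySem.Dict.empty).keys.Nodup) ∧
    (∀ x, x ∉ o → w.getD x PySem.Dict.empty = PySem.Dict.empty ∧ app.getD x 0 = 0)

theorem app2_getD (app : PySem.Dict String Int) (a b : String) (x : String) :
    ((app.modify a 0 (· + 1)).modify b 0 (· + 1)).getD x 0
      = app.getD x 0 + (if x = a then 1 else 0) + (if x = b then 1 else 0) := by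
  simp only [PySem.Dict.getD_modify]
  by_cases hxb : x = b
  · subst hxb
    by_cases hxa : x = a
    · subst hxa; simp
    · simp only [hxa, if_false, eq_self_iff_true, if_true]
      try ring
  · by_cases hxa : x = a
    · subst hxa
      simp only [hxb, if_false, eq_self_iff_true, if_true]
      try ring
    · simp only [hxa, hxb, if_false]
      try ring

theorem core_step
    (wB : PySem.Dict String (PySem.Dict String Int)) (app app2 : PySem.Dict String Int)
    (o : PySem.Set String) (win lose : String)
    (hInv : InvBW wB app o)
    (happ2 : ∀ x, app2.getD x 0 = app.getD x 0 + (if x = win then 1 else 0) + (if x = lose then 1 else 0))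
    (M : PySem.Dict String Int) (hM : M = (wB.getD win PySem.Dict.empty).modify lose 0 (· + 1))
    (w2 : PySem.Dict String (PySem.Dict String Int))
    (hw2 : w2 = (wB.insert win M).insert lose ((wB.insert win M).getD lose PySem.Dict.empty)) :
    ((mkD o (gInv wB app)).insert win
        (((mkD o (gInv wB app)).getD win (0, 0)).1 + 1,
         ((mkD o (gInv wB app)).getD win (0, 0)).2 + 1)).insert lose
      ((((mkD o (gInv wB app)).insert win
            (((mkD o (gInv wB app)).getD win (0, 0)).1 + 1,
             ((mkD o (gInv wB app)).getD win (0, 0)).2 + 1)).getD lose (0, 0)).1,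
       (((mkD o (gInv wB app)).insert win
            (((mkD o (gInv wB app)).getD win (0, 0)).1 + 1,
             ((mkD o (gInv wB app)).getD win (0, 0)).2 + 1)).getD lose (0, 0)).2 + 1)
      = mkD ((o.add win).add lose) (gInv w2 app2)
    ∧ InvBW w2 app2 ((o.add win).add lose) := by
  obtain ⟨ho, hwk, hik, hout⟩ := hInv
  -- p1 = gInv wB app win even when win ∉ o
  have hp1 : (mkD o (gInv wB app)).getD win (0, 0) = gInv wB app win := by
    rw [getD_mkD]
    by_cases h : win ∈ o
    · rw [if_pos h]
    · rw [if_neg h]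
      unfold gInv
      rw [(hout win h).1, (hout win h).2]
      simp [PySem.Dict.empty, PySem.Dict.values]
  -- r1 as mkD
  have hr1 : (mkD o (gInv wB app)).insert win
      (((mkD o (gInv wB app)).getD win (0, 0)).1 + 1,
       ((mkD o (gInv wB app)).getD win (0, 0)).2 + 1)
      = mkD (o.add win) (fun x => if x = win then ((gInv wB app win).1 + 1, (gInv wB app win).2 + 1)
          else gInv wB app x) := by
    rw [hp1, insert_mkD]
  have hnadd : (o.add win).Nodup := nodup_set_add o win ho
  -- p2
  have hp2 : (mkD (o.add win) (fun x => if x = win then ((gInv wB app win).1 + 1, (gInv wB app win).2 + 1)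
          else gInv wB app x)).getD lose (0, 0)
      = if lose = win then ((gInv wB app win).1 + 1, (gInv wB app win).2 + 1) else gInv wB app lose := by
    rw [getD_mkD]
    by_cases hlw : lose = win
    · simp [hlw, mem_set_add_self]
    · simp only [hlw, if_false]
      by_cases hlo : lose ∈ PySem.Set.add o win
      · simp [hlo]
      · have hlnot : lose ∉ o := fun h => hlo (mem_set_add o win lose h)
        rw [if_neg hlo]
        unfold gInv
        rw [(hout lose hlnot).1, (hout lose hlnot).2]
        simp [PySem.Dict.empty, PySem.Dict.values]
  -- getD of w2
  have hw2getD : ∀ x, w2.getD x PySem.Dict.empty = if x = win then M else wB.getD x PySem.Dict.empty := by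
    intro x
    rw [hw2, PySem.Dict.getD_insert]
    by_cases hxl : x = lose
    · subst hxl
      rw [if_pos rfl, PySem.Dict.getD_insert]
    · rw [if_neg hxl, PySem.Dict.getD_insert]
  -- row sums of w2
  have hMsum : (M.values).sum = ((wB.getD win PySem.Dict.empty).values).sum + 1 := by
    rw [hM, PySem.Dict.modify, sum_values_insert _ _ _ (hik win)]
    ring
  have hSum : ∀ x, ((w2.getD x PySem.Dict.empty).values).sum
      = if x = win then ((wB.getD win PySem.Dict.empty).values).sum + 1
        else ((wB.getD x PySem.Dict.empty).values).sum := by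
    intro x
    rw [hw2getD x]
    by_cases hxw : x = win
    · simp [hxw, hMsum]
    · simp [hxw]
  constructor
  · -- records equality
    rw [hr1, hp2, insert_mkD]
    apply mkD_congr
    intro x hx
    have hgi : gInv w2 app2 x = (((w2.getD x PySem.Dict.empty).values).sum, app2.getD x 0) := rfl
    rw [hgi, hSum x, happ2 x]
    by_cases hxl : x = lose
    · subst hxl
      by_cases hlw : x = win
      · subst hlw
        simp [gInv]
      · simp [hlw, gInv]
    · simp only [hxl, if_false]
      by_cases hxw : x = win
      · subst hxw
        simp [Ne.symm,  hxl, gInv]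
      · simp [hxw, hxl, gInv]
  · -- InvBW preserved
    refine ⟨nodup_set_add _ lose hnadd, ?_, ?_, ?_⟩
    · rw [hw2]
      exact PySem.Dict.nodup_keys_insert _ _ _ (PySem.Dict.nodup_keys_insert _ _ _ hwk)
    · intro x
      rw [hw2getD x]
      by_cases hxw : x = win
      · simp only [hxw, if_pos rfl]
        rw [hM, PySem.Dict.modify]
        exact PySem.Dict.nodup_keys_insert _ _ _ (hik win)
      · simp only [hxw, if_false]
        exact hik x
    · intro x hx
      have hxl : x ≠ lose := fun h => hx (by rw [h]; exact mem_set_add_self _ lose)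
      have hxw : x ≠ win := fun h => hx (by rw [h]; exact mem_set_add _ lose win (mem_set_add_self o win))
      have hxo : x ∉ o := fun h => hx (mem_set_add _ lose x (mem_set_add o win x h))
      have := hout x hxo
      constructor
      · rw [hw2getD x, if_neg hxw]; exact this.1
      · rw [happ2 x, if_neg hxw, if_neg hxl, this.2]; ring
def InvAB (sA : PySem.Dict String (PySem.Dict String Int) × PySem.Dict String (Int × Int))
    (sB : PySem.Dict String (PySem.Dict String Int) × PySem.Dict String Int × PySem.Set String) : Prop :=
  sA.1 = sB.1 ∧ sA.2 = mkD sB.2.2 (gInv sB.1 sB.2.1) ∧ InvBW sB.1 sB.2.1 sB.2.2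

theorem step_inv (sA : PySem.Dict String (PySem.Dict String Int) × PySem.Dict String (Int × Int))
    (sB : PySem.Dict String (PySem.Dict String Int) × PySem.Dict String Int × PySem.Set String)
    (r : String × String × String) (h : InvAB sA sB) :
    InvAB (build_win_matrix_step sA r) (build_win_matrix_alt_step sB r) := by
  obtain ⟨h1, h2, hInv⟩ := h
  have hInv' := hInv
  obtain ⟨ho, hwk, hik, hout⟩ := hInv'
  by_cases hw : (r.2.2 == r.1) = true
  · -- winner == a : win = a, lose = b
    have hcore := core_step sB.1 sB.2.1 ((sB.2.1.modify r.1 0 (· + 1)).modify r.2.1 0 (· + 1))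
      sB.2.2 r.1 r.2.1 hInv (fun x => app2_getD sB.2.1 r.1 r.2.1 x)
      ((sB.1.getD r.1 PySem.Dict.empty).modify r.2.1 0 (· + 1)) rfl
      ((sB.1.insert r.1 ((sB.1.getD r.1 PySem.Dict.empty).modify r.2.1 0 (· + 1))).insert r.2.1
        ((sB.1.insert r.1 ((sB.1.getD r.1 PySem.Dict.empty).modify r.2.1 0 (· + 1))).getD r.2.1
          PySem.Dict.empty)) rfl
    simp only [build_win_matrix_step, build_win_matrix_alt_step, hw, if_true]
    rw [h1, h2]
    set w1 := sB.1.insert r.1 ((sB.1.getD r.1 PySem.Dict.empty).modify r.2.1 0 (· + 1)) with hw1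
    have hga : w1.getD r.1 PySem.Dict.empty = (sB.1.getD r.1 PySem.Dict.empty).modify r.2.1 0 (· + 1) :=
      PySem.Dict.getD_insert_self _ _ _ _
    have hnoop : w1.insert r.1 (w1.getD r.1 PySem.Dict.empty) = w1 := by
      rw [hga, hw1, PySem.Dict.insert_insert_self]
    have hnd : (mkD ((sB.2.2.add r.1).add r.2.1)
        (gInv (w1.insert r.2.1 (w1.getD r.2.1 PySem.Dict.empty))
          ((sB.2.1.modify r.1 0 (· + 1)).modify r.2.1 0 (· + 1)))).keys.Nodup := by
      rw [keys_mkD]; exact hcore.2.1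
    have hca : (mkD ((sB.2.2.add r.1).add r.2.1)
        (gInv (w1.insert r.2.1 (w1.getD r.2.1 PySem.Dict.empty))
          ((sB.2.1.modify r.1 0 (· + 1)).modify r.2.1 0 (· + 1)))).contains r.1 = true := by
      rw [contains_mkD]
      simpa using mem_set_add _ r.2.1 r.1 (mem_set_add_self sB.2.2 r.1)
    have hcb : (mkD ((sB.2.2.add r.1).add r.2.1)
        (gInv (w1.insert r.2.1 (w1.getD r.2.1 PySem.Dict.empty))
          ((sB.2.1.modify r.1 0 (· + 1)).modify r.2.1 0 (· + 1)))).contains r.2.1 = true := by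
      rw [contains_mkD]
      simpa using mem_set_add_self _ r.2.1
    refine ⟨?_, ?_, ?_⟩
    · simp only [hnoop]
    · simp only [hnoop]
      rw [hcore.1]
      rw [insert_getD_self _ r.1 (0, 0) hnd hca]
      rw [insert_getD_self _ r.2.1 (0, 0) hnd hcb]
    · exact hcore.2
  · -- winner != a : win = b, lose = a
    have hcore := core_step sB.1 sB.2.1 ((sB.2.1.modify r.1 0 (· + 1)).modify r.2.1 0 (· + 1))
      sB.2.2 r.2.1 r.1 hInv
      (fun x => by rw [app2_getD sB.2.1 r.1 r.2.1 x]; ring)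
      ((sB.1.getD r.2.1 PySem.Dict.empty).modify r.1 0 (· + 1)) rfl
      ((sB.1.insert r.2.1 ((sB.1.getD r.2.1 PySem.Dict.empty).modify r.1 0 (· + 1))).insert r.1
        ((sB.1.insert r.2.1 ((sB.1.getD r.2.1 PySem.Dict.empty).modify r.1 0 (· + 1))).getD r.1
          PySem.Dict.empty)) rfl
    simp only [build_win_matrix_step, build_win_matrix_alt_step, hw, Bool.false_eq_true, if_false]
    rw [h1, h2]
    set w1 := sB.1.insert r.2.1 ((sB.1.getD r.2.1 PySem.Dict.empty).modify r.1 0 (· + 1)) with hw1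
    set w2 := w1.insert r.1 (w1.getD r.1 PySem.Dict.empty) with hw2d
    have hnd2 : w2.keys.Nodup :=
      PySem.Dict.nodup_keys_insert _ _ _ (PySem.Dict.nodup_keys_insert _ _ _ hwk)
    have hcb2 : w2.contains r.2.1 = true := by
      rw [hw2d, PySem.Dict.contains_insert, hw1, PySem.Dict.contains_insert]
      simp
    have hnoop : w2.insert r.2.1 (w2.getD r.2.1 PySem.Dict.empty) = w2 :=
      insert_getD_self w2 r.2.1 PySem.Dict.empty hnd2 hcb2
    have hnd : (mkD ((sB.2.2.add r.2.1).add r.1)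
        (gInv w2 ((sB.2.1.modify r.1 0 (· + 1)).modify r.2.1 0 (· + 1)))).keys.Nodup := by
      rw [keys_mkD]; exact hcore.2.1
    have hca : (mkD ((sB.2.2.add r.2.1).add r.1)
        (gInv w2 ((sB.2.1.modify r.1 0 (· + 1)).modify r.2.1 0 (· + 1)))).contains r.1 = true := by
      rw [contains_mkD]
      simpa using mem_set_add_self _ r.1
    have hcb : (mkD ((sB.2.2.add r.2.1).add r.1)
        (gInv w2 ((sB.2.1.modify r.1 0 (· + 1)).modify r.2.1 0 (· + 1)))).contains r.2.1 = true := by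
      rw [contains_mkD]
      simpa using mem_set_add _ r.1 r.2.1 (mem_set_add_self sB.2.2 r.2.1)
    refine ⟨?_, ?_, ?_⟩
    · simp only [hnoop]
    · simp only []
      rw [hcore.1]
      rw [insert_getD_self _ r.1 (0, 0) hnd hca]
      rw [insert_getD_self _ r.2.1 (0, 0) hnd hcb]
    · exact hcore.2

theorem init_inv : InvAB (PySem.Dict.empty, PySem.Dict.empty)
    (PySem.Dict.empty, PySem.Dict.empty, ([] : PySem.Set String)) := by
  refine ⟨rfl, rfl, List.nodup_nil, ?_, ?_, ?_⟩
  · simp [PySem.Dict.empty, PySem.Dict.keys]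
  · intro x
    rw [PySem.Dict.getD_empty]
    simp [PySem.Dict.empty, PySem.Dict.keys]
  · intro x _
    exact ⟨PySem.Dict.getD_empty x _, PySem.Dict.getD_empty x _⟩

theorem fold_inv (l : List (String × String × String)) :
    ∀ sA sB, InvAB sA sB →
      InvAB (l.foldl build_win_matrix_step sA) (l.foldl build_win_matrix_alt_step sB) := by
  induction l with
  | nil => intro sA sB h; exact h
  | cons r t ih =>
    intro sA sB h
    exact ih _ _ (step_inv sA sB r h)

theorem final_eq (results : List (String × String × String)) :
    build_win_matrix results = build_win_matrix_alt results := by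
  have h := fold_inv results (PySem.Dict.empty, PySem.Dict.empty)
    (PySem.Dict.empty, PySem.Dict.empty, ([] : PySem.Set String)) init_inv
  obtain ⟨h1, h2, ho, hwk, hik, hout⟩ := h
  simp only [build_win_matrix, build_win_matrix_alt]
  refine Prod.ext ?_ ?_
  · simp only [h1]
  · set stB := results.foldl build_win_matrix_alt_step
      (PySem.Dict.empty, PySem.Dict.empty, ([] : PySem.Set String)) with hstB
    have hfresh : ∀ x ∈ stB.2.2, (PySem.Dict.empty :
        PySem.Dict String (Int × Int)).contains x = false := fun x _ => PySem.Dict.contains_empty x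
    have hmapnd : (stB.2.2.map (fun x => x)).Nodup := by simpa using ho
    rw [h2]
    show (mkD stB.2.2 (gInv stB.1 stB.2.1)).items = _
    rw [PySem.Dict.items_foldl_insert_fresh stB.2.2 (fun x => x)
      (fun x => (((stB.1.getD x PySem.Dict.empty).values).sum, stB.2.1.getD x 0))
      PySem.Dict.empty hfresh hmapnd]
    simp [mkD, gInv, PySem.Dict.empty]

-- ===== VERDICT (by name: the statement is the Claim_ definition above) =====
theorem build_win_matrix_spec : Claim_equal_build_win_matrix := by
  intro results _
  unfold Spec_build_win_matrix
  exact final_eq results
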